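-- pv_equiv track=rewrite | github.com/KanonKC/Python-CU-2020 | 07_StrFile_32_password.py | letter_sequence
-- ===== SOURCE A (Python) =====
-- def letter_sequence(t):
--     for i in range(len(t)-3) :
--         k1 = ord(t[i]) ; k2 = ord(t[i+1]) ; k3 = ord(t[i+2]) ;k4 = ord(t[i+3])
--         if 65 <= k1 <= 65+26 : k1-=65
--         if 65 <= k2 <= 65+26 : k2-=65
--         if 65 <= k3 <= 65+26 : k3-=65
--         if 65 <= k4 <= 65+26 : k4-=65
--         if 97 <= k1 <= 97+26 : k1-=97
--         if 97 <= k2 <= 97+26 : k2-=97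
--         if 97 <= k3 <= 97+26 : k3-=97
--         if 97 <= k4 <= 97+26 : k4-=97
--         if (k4 == k3-1 == k2-2 == k1-3 or k4 == k3+1 == k2+2 == k1+3) and 0<=k1<=25 :
--             return True
--     return False
-- ===== SOURCE B (Python) =====
-- def _code(c):
--     k = ord(c)
--     if 65 <= k <= 91:
--         return k - 65
--     if 97 <= k <= 123:
--         return k - 97
--     return k
--
--
-- def letter_sequence(t):
--     asc = 1
--     desc = 1
--     prev = None
--     for c in t:
--         k = _code(c)
--         if prev is not None:
--             asc = asc + 1 if k == prev + 1 else 1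
--             desc = desc + 1 if k == prev - 1 else 1
--         if (asc >= 4 and 0 <= k - 3 <= 25) or (desc >= 4 and 0 <= k + 3 <= 25):
--             return True
--         prev = k
--     return False
-- ===== Notes on version B (the rewrite author's own statement) =====
-- stated objective: alternative
-- what changed: B scans the string once with a run-length state machine (ascending/descending run counters plus the previous normalized code) and reports a hit when a counter reaches 4 with the run's start code in 0..25, instead of A's sliding-window loop that re-reads and re-normalizes four characters at every index.
import Mathlib
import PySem

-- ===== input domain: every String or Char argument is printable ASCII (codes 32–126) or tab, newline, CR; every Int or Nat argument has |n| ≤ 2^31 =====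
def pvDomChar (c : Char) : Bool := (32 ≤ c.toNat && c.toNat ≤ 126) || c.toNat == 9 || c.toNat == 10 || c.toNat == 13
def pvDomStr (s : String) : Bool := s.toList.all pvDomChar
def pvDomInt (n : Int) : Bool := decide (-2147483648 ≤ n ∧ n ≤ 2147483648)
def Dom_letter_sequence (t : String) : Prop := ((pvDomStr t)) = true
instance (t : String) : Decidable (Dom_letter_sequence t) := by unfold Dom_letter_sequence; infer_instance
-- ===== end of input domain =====

-- B replaces A's 4-wide sliding-window test (re-normalizing four characters per index)
-- by a single-pass state machine keeping ascending/descending run-length counters; objective: alternative.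

-- ===== PORT A =====
-- the for-loop of A over the remaining index list; the `| _ => false` arm is an
-- unreachable totality guard (range indices i..i+3 are always in bounds)
def letterSeqGoA (cs : List Char) : List Int → Bool
  | [] => false
  | i :: rest =>
    match PySem.List.pyGet? cs i, PySem.List.pyGet? cs (i + 1),
          PySem.List.pyGet? cs (i + 2), PySem.List.pyGet? cs (i + 3) with
    | some c1, some c2, some c3, some c4 =>
      let k1 : Int := c1.toNat
      let k2 : Int := c2.toNat
      let k3 : Int := c3.toNat
      let k4 : Int := c4.toNat
      let k1 := if 65 ≤ k1 ∧ k1 ≤ 65 + 26 then k1 - 65 else k1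
      let k2 := if 65 ≤ k2 ∧ k2 ≤ 65 + 26 then k2 - 65 else k2
      let k3 := if 65 ≤ k3 ∧ k3 ≤ 65 + 26 then k3 - 65 else k3
      let k4 := if 65 ≤ k4 ∧ k4 ≤ 65 + 26 then k4 - 65 else k4
      let k1 := if 97 ≤ k1 ∧ k1 ≤ 97 + 26 then k1 - 97 else k1
      let k2 := if 97 ≤ k2 ∧ k2 ≤ 97 + 26 then k2 - 97 else k2
      let k3 := if 97 ≤ k3 ∧ k3 ≤ 97 + 26 then k3 - 97 else k3
      let k4 := if 97 ≤ k4 ∧ k4 ≤ 97 + 26 then k4 - 97 else k4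
      if (k4 = k3 - 1 ∧ k3 - 1 = k2 - 2 ∧ k2 - 2 = k1 - 3
            ∨ k4 = k3 + 1 ∧ k3 + 1 = k2 + 2 ∧ k2 + 2 = k1 + 3)
          ∧ 0 ≤ k1 ∧ k1 ≤ 25 then true
      else letterSeqGoA cs rest
    | _, _, _, _ => false

def letter_sequence (t : String) : Bool :=
  letterSeqGoA t.toList (PySem.List.pyRange 0 (PySem.Str.len t - 3) 1)

-- ===== PORT B =====
-- Source B's helper _code
def pvNorm (c : Char) : Int :=
  let k : Int := c.toNat
  if 65 ≤ k ∧ k ≤ 91 then k - 65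
  else if 97 ≤ k ∧ k ≤ 123 then k - 97
  else k

-- Source B's for-loop: state = (prev, asc, desc)
def goB : Option Int → Int → Int → List Char → Bool
  | _, _, _, [] => false
  | prev, asc, desc, c :: rest =>
    let k := pvNorm c
    let asc := match prev with | none => asc | some p => if k = p + 1 then asc + 1 else 1
    let desc := match prev with | none => desc | some p => if k = p - 1 then desc + 1 else 1
    if (4 ≤ asc ∧ 0 ≤ k - 3 ∧ k - 3 ≤ 25) ∨ (4 ≤ desc ∧ 0 ≤ k + 3 ∧ k + 3 ≤ 25) then true
    else goB (some k) asc desc rest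

def letter_sequence_alt (t : String) : Bool := goB none 1 1 t.toList

-- ===== PRECONDITION & SPEC =====
def Spec_letter_sequence (t : String) (out : Bool) : Prop := out = letter_sequence_alt t
instance (t : String) (out : Bool) : Decidable (Spec_letter_sequence t out) := by unfold Spec_letter_sequence; infer_instance

-- ===== CLAIM (what is proved, stated in full; the proofs are below) =====
def Claim_equal_letter_sequence : Prop := ∀ (t : String), Dom_letter_sequence t → Spec_letter_sequence t (letter_sequence t)

-- ===== LEMMAS AND PROOFS =====

-- proof-side window view: zip of four shifted lists, A's window condition, any-window scan
def pvZip4 : List Int → List Int → List Int → List Int → List (Int × Int × Int × Int)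
  | a :: as, b :: bs, c :: cs, d :: ds => (a, b, c, d) :: pvZip4 as bs cs ds
  | _, _, _, _ => []

def pvCond (q : Int × Int × Int × Int) : Bool :=
  decide (((q.2.1 = q.1 + 1 ∧ q.2.2.1 = q.1 + 2 ∧ q.2.2.2 = q.1 + 3)
            ∨ (q.2.1 = q.1 - 1 ∧ q.2.2.1 = q.1 - 2 ∧ q.2.2.2 = q.1 - 3))
          ∧ 0 ≤ q.1 ∧ q.1 ≤ 25)

def pvAnyW (v : List Int) : Bool := (pvZip4 v (v.drop 1) (v.drop 2) (v.drop 3)).any pvCond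

lemma pvAnyW_short (v : List Int) (h : v.length ≤ 3) : pvAnyW v = false := by
  rcases v with _ | ⟨a, _ | ⟨b, _ | ⟨c, _ | ⟨d, w⟩⟩⟩⟩ <;> first | rfl | (simp at h; omega)

lemma pvAnyW_cons4 (a b c d : Int) (w : List Int) :
    pvAnyW (a :: b :: c :: d :: w) = (pvCond (a, b, c, d) || pvAnyW (b :: c :: d :: w)) := by
  simp [pvAnyW, pvZip4]

lemma pvIteOr (P Q : Prop) [Decidable P] [Decidable Q] (r : Bool) (h : P ↔ Q) :
    (if P then true else r) = (decide Q || r) := by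
  by_cases hp : P
  · simp [hp, decide_eq_true (h.mp hp)]
  · have hq : ¬ Q := fun hh => hp (h.mpr hh)
    simp [hp, hq]

lemma pvNorm_eq (c : Char) :
    (if 97 ≤ (if 65 ≤ (c.toNat : Int) ∧ (c.toNat : Int) ≤ 65 + 26 then (c.toNat : Int) - 65 else (c.toNat : Int))
          ∧ (if 65 ≤ (c.toNat : Int) ∧ (c.toNat : Int) ≤ 65 + 26 then (c.toNat : Int) - 65 else (c.toNat : Int)) ≤ 97 + 26
        then (if 65 ≤ (c.toNat : Int) ∧ (c.toNat : Int) ≤ 65 + 26 then (c.toNat : Int) - 65 else (c.toNat : Int)) - 97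
        else (if 65 ≤ (c.toNat : Int) ∧ (c.toNat : Int) ≤ 65 + 26 then (c.toNat : Int) - 65 else (c.toNat : Int)))
      = pvNorm c := by
  simp only [pvNorm]
  split_ifs <;> omega

-- A-side loop invariant: A's index loop from j equals the window scan of the normalized suffix from j
lemma letterSeq_main : ∀ (fuel : Nat) (cs : List Char) (j : Nat), cs.length ≤ j + fuel →
    letterSeqGoA cs (PySem.List.pyRange (j : Int) ((cs.length : Int) - 3) 1)
      = pvAnyW ((cs.drop j).map pvNorm) := by
  intro fuel
  induction fuel with
  | zero =>
    intro cs j h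
    rw [PySem.List.pyRange_one_eq_nil (by omega), List.drop_eq_nil_of_le (by omega)]
    rfl
  | succ fuel ih =>
    intro cs j h
    by_cases hj : (j : Int) < (cs.length : Int) - 3
    · have hlen : j + 4 ≤ cs.length := by omega
      have e1 : PySem.List.pyGet? cs ((j : Int)) = some cs[j] := by
        rw [PySem.List.pyGet?_natCast]; exact List.getElem?_eq_getElem (by omega)
      have e2 : PySem.List.pyGet? cs ((j : Int) + 1) = some cs[j + 1] := by
        rw [show ((j : Int) + 1) = ((j + 1 : Nat) : Int) by push_cast; ring, PySem.List.pyGet?_natCast]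
        exact List.getElem?_eq_getElem (by omega)
      have e3 : PySem.List.pyGet? cs ((j : Int) + 2) = some cs[j + 2] := by
        rw [show ((j : Int) + 2) = ((j + 2 : Nat) : Int) by push_cast; ring, PySem.List.pyGet?_natCast]
        exact List.getElem?_eq_getElem (by omega)
      have e4 : PySem.List.pyGet? cs ((j : Int) + 3) = some cs[j + 3] := by
        rw [show ((j : Int) + 3) = ((j + 3 : Nat) : Int) by push_cast; ring, PySem.List.pyGet?_natCast]
        exact List.getElem?_eq_getElem (by omega)
      have hrec : letterSeqGoA cs (PySem.List.pyRange ((j : Int) + 1) ((cs.length : Int) - 3) 1)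
          = pvAnyW ((cs.drop (j + 1)).map pvNorm) := by
        have := ih cs (j + 1) (by omega)
        rwa [show (((j + 1 : Nat)) : Int) = (j : Int) + 1 by push_cast; ring] at this
      have hdrop : cs.drop j = cs[j] :: cs[j + 1] :: cs[j + 2] :: cs[j + 3] :: cs.drop (j + 4) := by
        rw [List.drop_eq_getElem_cons (by omega), List.drop_eq_getElem_cons (by omega),
            List.drop_eq_getElem_cons (by omega), List.drop_eq_getElem_cons (by omega)]
        norm_num
      have hdrop1 : cs.drop (j + 1) = cs[j + 1] :: cs[j + 2] :: cs[j + 3] :: cs.drop (j + 4) := by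
        rw [List.drop_eq_getElem_cons (by omega), List.drop_eq_getElem_cons (by omega),
            List.drop_eq_getElem_cons (by omega)]
        norm_num
      rw [PySem.List.pyRange_one_cons hj, hdrop]
      simp only [List.map_cons]
      rw [pvAnyW_cons4]
      simp only [letterSeqGoA, e1, e2, e3, e4]
      rw [hrec, hdrop1]
      simp only [List.map_cons]
      simp only [pvNorm_eq]
      simp only [pvCond]
      exact pvIteOr _ _ _ (by omega)
    · rw [PySem.List.pyRange_one_eq_nil (by omega)]
      rw [pvAnyW_short _ (by simp; omega)]
      rfl

-- B-side stepping lemmas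
lemma goB_step0 (ch : Char) (rest : List Char) :
    goB none 1 1 (ch :: rest) = goB (some (pvNorm ch)) 1 1 rest := by
  simp only [goB]
  rw [if_neg (by omega)]

lemma goB_step (a asc desc asc' desc' : Int) (ch : Char) (rest : List Char)
    (ha : asc' = if pvNorm ch = a + 1 then asc + 1 else 1)
    (hd : desc' = if pvNorm ch = a - 1 then desc + 1 else 1)
    (hno : asc' ≤ 3 ∧ desc' ≤ 3) :
    goB (some a) asc desc (ch :: rest) = goB (some (pvNorm ch)) asc' desc' rest := by
  simp only [goB]
  rw [← ha, ← hd]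
  rw [if_neg (by omega)]

-- B-side main invariant: the run counters summarize whether the last three normalized
-- values (a most recent, then b, then c) step by +1 / -1
lemma goB_main : ∀ (rest : List Char) (a b c asc desc : Int),
    1 ≤ asc → (2 ≤ asc ↔ a = b + 1) → (3 ≤ asc ↔ (a = b + 1 ∧ b = c + 1)) →
    1 ≤ desc → (2 ≤ desc ↔ a = b - 1) → (3 ≤ desc ↔ (a = b - 1 ∧ b = c - 1)) →
    goB (some a) asc desc rest = pvAnyW (c :: b :: a :: rest.map pvNorm) := by
  intro rest
  induction rest with
  | nil =>
    intro a b c asc desc _ _ _ _ _ _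
    rw [pvAnyW_short _ (by simp)]
    rfl
  | cons ch rest ih =>
    intro a b c asc desc h1 h2 h3 h4 h5 h6
    simp only [goB, List.map_cons]
    rw [pvAnyW_cons4]
    rw [ih (pvNorm ch) a b
          (if pvNorm ch = a + 1 then asc + 1 else 1)
          (if pvNorm ch = a - 1 then desc + 1 else 1)
          (by split_ifs <;> omega) (by split_ifs <;> omega) (by split_ifs <;> omega)
          (by split_ifs <;> omega) (by split_ifs <;> omega) (by split_ifs <;> omega)]
    simp only [pvCond]
    exact pvIteOr _ _ _ (by split_ifs <;> omega)

lemma goB_eq : ∀ (cs : List Char), goB none 1 1 cs = pvAnyW (cs.map pvNorm) := by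
  intro cs
  match cs with
  | [] => rfl
  | [x] =>
    rw [goB_step0, pvAnyW_short _ (by simp)]
    rfl
  | [x, y] =>
    rw [goB_step0, goB_step (pvNorm x) 1 1 _ _ y [] rfl rfl (by constructor <;> (split_ifs <;> omega)),
        pvAnyW_short _ (by simp)]
    rfl
  | x :: y :: z :: rest =>
    rw [goB_step0,
        goB_step (pvNorm x) 1 1 _ _ y (z :: rest) rfl rfl (by constructor <;> (split_ifs <;> omega)),
        goB_step (pvNorm y) _ _ _ _ z rest rfl rfl (by constructor <;> (split_ifs <;> omega)),
        goB_main rest (pvNorm z) (pvNorm y) (pvNorm x) _ _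
          (by split_ifs <;> omega) (by split_ifs <;> omega) (by split_ifs <;> omega)
          (by split_ifs <;> omega) (by split_ifs <;> omega) (by split_ifs <;> omega)]
    simp only [List.map_cons]

-- ===== VERDICT (by name: the statement is the Claim_ definition above) =====
theorem letter_sequence_spec : Claim_equal_letter_sequence := by
  intro t _
  unfold Spec_letter_sequence letter_sequence letter_sequence_alt
  rw [goB_eq]
  simpa using letterSeq_main t.toList.length t.toList 0 (by omega)
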